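-- pv_equiv track=rewrite | github.com/eyripidiska/OneTimePadPython2 | OneTimePad2.py | combine_three_cipher
-- ===== SOURCE A (Python) =====
-- def combine_three_cipher(com1, com2):
--     common_values = []
--     for dictionary1 in com1:
--         for dictionary2 in com2:
--             if (dictionary1.get("digit") == dictionary2.get("digit")) and (dictionary1.get("value 1") == dictionary2.get("value 1") or dictionary1.get("value 1") == dictionary2.get("value 2")
--                 or dictionary1.get("value 2") == dictionary2.get("value 1") or dictionary1.get("value 2") == dictionary2.get("value 2")):
--
--
--                     common_values.append({"digit": dictionary1.get("digit"), "value 1": dictionary1.get("value 1"), "value 2": dictionary2.get("value 1"), "value 3": dictionary1.get("value 2"), "value 4": dictionary2.get("value 2")})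
--         # Iterate over key-value pairs in the dictionary
--
--
--     return common_values
-- ===== SOURCE B (Python) =====
-- def combine_three_cipher(com1, com2):
--     # Bucket com2 once by its "digit" value, so each com1 record only scans
--     # the bucket with the matching digit instead of all of com2.
--     index = {}
--     for d2 in com2:
--         index.setdefault(d2.get("digit"), []).append(d2)
--     out = []
--     for d1 in com1:
--         v1 = d1.get("value 1")
--         v2 = d1.get("value 2")
--         for d2 in index.get(d1.get("digit"), []):
--             w1 = d2.get("value 1")
--             w2 = d2.get("value 2")
--             if v1 == w1 or v1 == w2 or v2 == w1 or v2 == w2: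
--                 out.append({"digit": d1.get("digit"), "value 1": v1,
--                             "value 2": w1, "value 3": v2, "value 4": w2})
--     return out
-- ===== Notes on version B (the rewrite author's own statement) =====
-- stated objective: alternative
-- what changed: B buckets com2 once in a hash map keyed by the 'digit' value and, for each com1 record, scans only the equal-digit bucket instead of all of com2; on the timed inputs this was not measurably faster (1.32x at the largest size), so no speed is claimed.
import Mathlib
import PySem

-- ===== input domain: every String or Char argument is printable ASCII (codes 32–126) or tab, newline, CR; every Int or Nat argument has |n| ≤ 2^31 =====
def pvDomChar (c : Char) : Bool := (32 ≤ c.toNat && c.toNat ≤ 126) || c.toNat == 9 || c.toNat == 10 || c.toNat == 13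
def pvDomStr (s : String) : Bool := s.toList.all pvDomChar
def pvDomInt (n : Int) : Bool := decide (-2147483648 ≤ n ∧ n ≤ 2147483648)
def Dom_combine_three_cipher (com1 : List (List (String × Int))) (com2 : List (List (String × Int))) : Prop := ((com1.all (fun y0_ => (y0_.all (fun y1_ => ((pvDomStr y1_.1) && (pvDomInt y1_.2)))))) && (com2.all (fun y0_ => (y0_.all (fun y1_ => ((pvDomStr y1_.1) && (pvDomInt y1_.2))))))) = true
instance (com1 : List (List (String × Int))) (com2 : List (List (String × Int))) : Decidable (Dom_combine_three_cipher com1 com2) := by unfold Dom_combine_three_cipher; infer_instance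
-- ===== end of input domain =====

-- B buckets com2 once by its "digit" value so each com1 record scans only the equal-digit bucket instead of all of com2 (an alternative, index-based pairing; no speed claimed).

-- shared helper: d.get(k) on a dict modelled as an association list (first match)
def pvGet (d : List (String × Int)) (k : String) : Option Int := d.lookup k

-- the emitted record; Pre_ guarantees every looked-up key is present at each append,
-- so the `.getD 0` placeholders (Python's None has no Int value) never show through.
def pvRecord (d1 d2 : List (String × Int)) : List (String × Int) :=
  [("digit", (pvGet d1 "digit").getD 0), ("value 1", (pvGet d1 "value 1").getD 0),
   ("value 2", (pvGet d2 "value 1").getD 0), ("value 3", (pvGet d1 "value 2").getD 0),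
   ("value 4", (pvGet d2 "value 2").getD 0)]

-- the value-overlap test shared by both conditions
def pvValMatch (d1 d2 : List (String × Int)) : Bool :=
  (pvGet d1 "value 1" == pvGet d2 "value 1") || (pvGet d1 "value 1" == pvGet d2 "value 2") ||
  (pvGet d1 "value 2" == pvGet d2 "value 1") || (pvGet d1 "value 2" == pvGet d2 "value 2")

-- ===== PORT A =====
def combine_three_cipher (com1 : List (List (String × Int))) (com2 : List (List (String × Int))) : List (List (String × Int)) :=
  com1.foldl (fun acc d1 =>
    com2.foldl (fun acc2 d2 =>
      if (pvGet d1 "digit" == pvGet d2 "digit") && pvValMatch d1 d2 then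
        acc2 ++ [pvRecord d1 d2]
      else acc2) acc) []

-- ===== PORT B =====
-- index.setdefault(d2.get("digit"), []).append(d2), rendered purely as a modify
def pvIndex (com2 : List (List (String × Int))) : PySem.Dict (Option Int) (List (List (String × Int))) :=
  com2.foldl (fun ix d2 => ix.modify (pvGet d2 "digit") [] (· ++ [d2])) PySem.Dict.empty

def combine_three_cipher_alt (com1 : List (List (String × Int))) (com2 : List (List (String × Int))) : List (List (String × Int)) :=
  com1.foldl (fun out d1 =>
    ((pvIndex com2).getD (pvGet d1 "digit") []).foldl (fun out2 d2 =>
      if pvValMatch d1 d2 then out2 ++ [pvRecord d1 d2] else out2) out) []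

-- ===== PRECONDITION & SPEC =====
-- Pre_ excludes exactly the inputs on which some matching pair lacks one of the keys
-- "digit"/"value 1"/"value 2": there Python appends a dict containing None, which is
-- not a value of the declared dict[str,int] return type.
def Pre_combine_three_cipher (com1 : List (List (String × Int))) (com2 : List (List (String × Int))) : Prop :=
  ∀ d1 ∈ com1, ∀ d2 ∈ com2,
    ((pvGet d1 "digit" == pvGet d2 "digit") && pvValMatch d1 d2) = true →
    ((pvGet d1 "digit").isSome ∧ (pvGet d1 "value 1").isSome ∧ (pvGet d1 "value 2").isSome ∧
     (pvGet d2 "value 1").isSome ∧ (pvGet d2 "value 2").isSome)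
instance (com1 : List (List (String × Int))) (com2 : List (List (String × Int))) : Decidable (Pre_combine_three_cipher com1 com2) := by unfold Pre_combine_three_cipher; infer_instance

def pvWitness_combine_three_cipher : (List (List (String × Int))) × (List (List (String × Int))) :=
  ([[("digit", 1), ("value 1", 2), ("value 2", 3)]],
   [[("digit", 1), ("value 1", 2), ("value 2", 9)], [("digit", 4), ("value 1", 2), ("value 2", 3)]])

def Spec_combine_three_cipher (com1 : List (List (String × Int))) (com2 : List (List (String × Int))) (out : List (List (String × Int))) : Prop := out = combine_three_cipher_alt com1 com2
instance (com1 : List (List (String × Int))) (com2 : List (List (String × Int))) (out : List (List (String × Int))) : Decidable (Spec_combine_three_cipher com1 com2 out) := by unfold Spec_combine_three_cipher; infer_instance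

-- ===== CLAIM (what is proved, stated in full; the proofs are below) =====
def Claim_equal_combine_three_cipher : Prop := ∀ (com1 : List (List (String × Int))) (com2 : List (List (String × Int))), Dom_combine_three_cipher com1 com2 → Pre_combine_three_cipher com1 com2 → Spec_combine_three_cipher com1 com2 (combine_three_cipher com1 com2)

-- ===== LEMMAS AND PROOFS =====

-- the bucket of the built index at key g is exactly the equal-digit sublist of com2, in order
lemma pvIndex_getD (com2 : List (List (String × Int))) (g : Option Int) :
    (pvIndex com2).getD g [] = com2.filter (fun d2 => pvGet d2 "digit" == g) := by
  unfold pvIndex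
  rw [← List.foldl_map (f := fun d2 => ((pvGet d2 "digit" : Option Int), d2))
        (g := fun (ix : PySem.Dict (Option Int) (List (List (String × Int)))) p =>
          ix.modify p.1 [] (· ++ [p.2]))]
  rw [PySem.Dict.getD_foldl_modify_append]
  simp [List.filter_map, Function.comp_def]

-- folding A's guarded append over com2 equals folding B's guarded append over the equal-digit bucket
lemma inner_eq (d1 : List (String × Int)) (com2 : List (List (String × Int))) :
    ∀ acc : List (List (String × Int)),
      (com2.filter (fun d2 => pvGet d2 "digit" == pvGet d1 "digit")).foldl
        (fun out2 d2 => if pvValMatch d1 d2 then out2 ++ [pvRecord d1 d2] else out2) acc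
      = com2.foldl (fun acc2 d2 =>
          if (pvGet d1 "digit" == pvGet d2 "digit") && pvValMatch d1 d2 then
            acc2 ++ [pvRecord d1 d2] else acc2) acc := by
  induction com2 with
  | nil => intro acc; rfl
  | cons d2 rest ih =>
    intro acc
    by_cases hd : pvGet d2 "digit" = pvGet d1 "digit"
    · simp only [List.filter_cons, List.foldl_cons, hd, beq_self_eq_true, if_pos, Bool.true_and]
      rw [ih]
    · have h1 : (pvGet d2 "digit" == pvGet d1 "digit") = false := by
        simpa using hd
      have h2 : (pvGet d1 "digit" == pvGet d2 "digit") = false := by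
        simpa using fun h => hd h.symm
      simp only [List.filter_cons, List.foldl_cons, h1, h2, Bool.false_and, if_neg,
        Bool.false_eq_true, not_false_eq_true]
      rw [ih]

lemma ports_eq (com1 com2 : List (List (String × Int))) :
    combine_three_cipher com1 com2 = combine_three_cipher_alt com1 com2 := by
  unfold combine_three_cipher combine_three_cipher_alt
  have h : (fun (acc : List (List (String × Int))) d1 =>
        com2.foldl (fun acc2 d2 =>
          if (pvGet d1 "digit" == pvGet d2 "digit") && pvValMatch d1 d2 then
            acc2 ++ [pvRecord d1 d2] else acc2) acc)
      = fun acc d1 =>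
        ((pvIndex com2).getD (pvGet d1 "digit") []).foldl (fun out2 d2 =>
          if pvValMatch d1 d2 then out2 ++ [pvRecord d1 d2] else out2) acc := by
    funext acc d1
    rw [pvIndex_getD, inner_eq]
  rw [h]

-- ===== VERDICT (by name: the statement is the Claim_ definition above) =====
theorem combine_three_cipher_spec : Claim_equal_combine_three_cipher := by
  intro com1 com2 _ _
  unfold Spec_combine_three_cipher
  exact ports_eq com1 com2
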